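-- pv_equiv track=rewrite | github.com/Panacota96/ai-cyber-lab | apps/agents/report_agent.py | _categorize_commands
-- ===== SOURCE A (Python) =====
-- from collections import defaultdict
--
-- def _categorize_commands(rows: list[dict[str, str]]) -> dict[str, list[str]]:
--     buckets: dict[str, list[str]] = defaultdict(list)
--
--     for row in rows:
--         if row.get("event") not in {"command", "command_output"}:
--             continue
--
--         cmd = row.get("cmd", "").strip()
--         if not cmd:
--             cmd = row.get("raw", "").strip()
--
--         if any(t in cmd for t in ("nmap", "rustscan", "masscan", "ping")):
--             buckets["Recon"].append(cmd)
--         elif any(t in cmd for t in ("ffuf", "gobuster", "feroxbuster", "whatweb", "nikto")):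
--             buckets["Web Enumeration"].append(cmd)
--         elif any(t in cmd for t in ("sqlmap", "hydra", "wfuzz")):
--             buckets["Validation / Exploitation"].append(cmd)
--         elif any(t in cmd for t in ("linpeas", "winpeas", "sudo -l", "id")):
--             buckets["Privilege Escalation"].append(cmd)
--         else:
--             buckets["Other"].append(cmd)
--
--     return buckets
-- ===== SOURCE B (Python) =====
-- from collections import defaultdict
--
-- # Flat priority list: scanning it in order and taking the FIRST matching keyword
-- # yields the first category (in A's elif order) containing any matching keyword.
-- _KEYWORDS = [(kw, cat) for cat, kws in (
--     ("Recon", ("nmap", "rustscan", "masscan", "ping")),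
--     ("Web Enumeration", ("ffuf", "gobuster", "feroxbuster", "whatweb", "nikto")),
--     ("Validation / Exploitation", ("sqlmap", "hydra", "wfuzz")),
--     ("Privilege Escalation", ("linpeas", "winpeas", "sudo -l", "id")),
-- ) for kw in kws]
--
--
-- def _categorize_commands(rows: list[dict[str, str]]) -> dict[str, list[str]]:
--     # Stage 1: one pass producing (label, cmd) pairs; no dict is touched here.
--     pairs = []
--     for row in rows:
--         if row.get("event") in ("command", "command_output"):
--             cmd = row.get("cmd", "").strip() or row.get("raw", "").strip()
--             label = "Other"
--             for kw, cat in _KEYWORDS: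
--                 if kw in cmd:
--                     label = cat
--                     break
--             pairs.append((label, cmd))
--     # Stage 2: key order = first appearance of each label; Stage 3: group by label.
--     order = list(dict.fromkeys(label for label, _ in pairs))
--     return defaultdict(list, {k: [c for l, c in pairs if l == k] for k in order})
-- ===== Notes on version B (the rewrite author's own statement) =====
-- stated objective: alternative
-- what changed: B is staged instead of accumulative: it first builds a flat (label, cmd) pair list (labelling by scanning one flat keyword->category priority list instead of A's per-category elif ladder), then derives the key order by first-occurrence dedup of the labels, and finally builds each bucket by a group-by comprehension over the pair list; A instead appends into a defaultdict as it goes.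
import Mathlib
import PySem

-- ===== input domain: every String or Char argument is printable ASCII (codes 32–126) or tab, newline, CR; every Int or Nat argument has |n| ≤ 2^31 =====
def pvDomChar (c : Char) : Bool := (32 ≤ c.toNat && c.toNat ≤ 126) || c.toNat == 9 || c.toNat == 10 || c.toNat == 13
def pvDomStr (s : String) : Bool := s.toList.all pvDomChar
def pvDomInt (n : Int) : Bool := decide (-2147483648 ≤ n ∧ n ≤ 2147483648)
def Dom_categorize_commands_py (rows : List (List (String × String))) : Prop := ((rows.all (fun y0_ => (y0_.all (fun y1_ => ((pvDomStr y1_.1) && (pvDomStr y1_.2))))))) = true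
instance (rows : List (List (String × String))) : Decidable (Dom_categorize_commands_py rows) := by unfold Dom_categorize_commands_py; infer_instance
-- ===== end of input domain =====

-- B is staged instead of accumulative: first a flat (label, cmd) pair list (labels from one flat
-- keyword->category priority list, not A's per-category elif ladder), then first-occurrence key order,
-- then a group-by per key; A appends into a defaultdict as it goes. Return value only.

-- ===== PORT A =====
-- row.get(k) on the association list = first match (List.lookup); row.get(k, "") likewise with default.
def pvGetEvent (row : List (String × String)) : Option String := List.lookup "event" row

-- one iteration of A's 'for row in rows' loop over the defaultdict accumulator
def pvStepA (buckets : PySem.Dict String (List String)) (row : List (String × String)) :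
    PySem.Dict String (List String) :=
  if ¬ (pvGetEvent row = some "command" ∨ pvGetEvent row = some "command_output") then buckets
  else
    let cmd0 := PySem.Str.strip ((List.lookup "cmd" row).getD "")
    let cmd := if cmd0 = "" then PySem.Str.strip ((List.lookup "raw" row).getD "") else cmd0
    if ["nmap", "rustscan", "masscan", "ping"].any (fun t => PySem.Str.isIn t cmd) then
      buckets.modify "Recon" [] (fun l => l ++ [cmd])
    else if ["ffuf", "gobuster", "feroxbuster", "whatweb", "nikto"].any (fun t => PySem.Str.isIn t cmd) then
      buckets.modify "Web Enumeration" [] (fun l => l ++ [cmd])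
    else if ["sqlmap", "hydra", "wfuzz"].any (fun t => PySem.Str.isIn t cmd) then
      buckets.modify "Validation / Exploitation" [] (fun l => l ++ [cmd])
    else if ["linpeas", "winpeas", "sudo -l", "id"].any (fun t => PySem.Str.isIn t cmd) then
      buckets.modify "Privilege Escalation" [] (fun l => l ++ [cmd])
    else
      buckets.modify "Other" [] (fun l => l ++ [cmd])

def categorize_commands_py (rows : List (List (String × String))) : List (String × List String) :=
  (rows.foldl pvStepA PySem.Dict.empty).items

-- ===== PORT B =====
-- the flat _KEYWORDS priority list (keyword, category)
def pvKeywords : List (String × String) :=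
  [("nmap", "Recon"), ("rustscan", "Recon"), ("masscan", "Recon"), ("ping", "Recon"),
   ("ffuf", "Web Enumeration"), ("gobuster", "Web Enumeration"), ("feroxbuster", "Web Enumeration"),
   ("whatweb", "Web Enumeration"), ("nikto", "Web Enumeration"),
   ("sqlmap", "Validation / Exploitation"), ("hydra", "Validation / Exploitation"),
   ("wfuzz", "Validation / Exploitation"),
   ("linpeas", "Privilege Escalation"), ("winpeas", "Privilege Escalation"),
   ("sudo -l", "Privilege Escalation"), ("id", "Privilege Escalation")]

-- B's inner 'for kw, cat in _KEYWORDS: if kw in cmd: label = cat; break' (else "Other")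
def pvLabelLoop (cmd : String) : List (String × String) → String
  | [] => "Other"
  | (kw, cat) :: rest => if PySem.Str.isIn kw cmd then cat else pvLabelLoop cmd rest

-- cmd = row.get("cmd","").strip() or row.get("raw","").strip()
def pvExtract (row : List (String × String)) : String :=
  let c := PySem.Str.strip ((List.lookup "cmd" row).getD "")
  if c = "" then PySem.Str.strip ((List.lookup "raw" row).getD "") else c

-- row.get("event") in ("command", "command_output")
def pvIsCmdRow (row : List (String × String)) : Bool :=
  List.lookup "event" row == some "command" || List.lookup "event" row == some "command_output"

def categorize_commands_py_alt (rows : List (List (String × String))) : List (String × List String) :=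
  -- Stage 1: the pair-building loop
  let pairs := rows.foldl
    (fun acc row =>
      if pvIsCmdRow row then acc ++ [(pvLabelLoop (pvExtract row) pvKeywords, pvExtract row)]
      else acc) []
  -- Stage 2: list(dict.fromkeys(labels)) = ordered first-occurrence dedup
  let order := PySem.List.dedup (pairs.map (·.1))
  -- Stage 3: the grouping dict comprehension, in 'order' key order
  order.map (fun k => (k, (pairs.filter (fun p => p.1 == k)).map (·.2)))

-- ===== PRECONDITION & SPEC =====
def Spec_categorize_commands_py (rows : List (List (String × String))) (out : List (String × List String)) : Prop := out = categorize_commands_py_alt rows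
instance (rows : List (List (String × String))) (out : List (String × List String)) : Decidable (Spec_categorize_commands_py rows out) := by unfold Spec_categorize_commands_py; infer_instance

-- ===== CLAIM (what is proved, stated in full; the proofs are below) =====
def Claim_equal_categorize_commands_py : Prop := ∀ (rows : List (List (String × String))), Dom_categorize_commands_py rows → Spec_categorize_commands_py rows (categorize_commands_py rows)

-- ===== LEMMAS AND PROOFS =====
-- B's first-match scan over one category's keyword segment of the flat list = A's 'any' test for that category
theorem pvLabelLoop_segment (cmd cat : String) (kws : List String) (rest : List (String × String)) :
    pvLabelLoop cmd (kws.map (fun kw => (kw, cat)) ++ rest) =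
      if kws.any (fun t => PySem.Str.isIn t cmd) then cat else pvLabelLoop cmd rest := by
  induction kws with
  | nil => simp
  | cons k ks ih =>
    simp only [List.map_cons, List.cons_append, pvLabelLoop, List.any_cons, ih,
      Bool.or_eq_true]
    split_ifs <;> tauto

-- B's flat-priority-list label = A's elif ladder
theorem pvLabelLoop_spec (cmd : String) :
    pvLabelLoop cmd pvKeywords =
      if ["nmap", "rustscan", "masscan", "ping"].any (fun t => PySem.Str.isIn t cmd) then "Recon"
      else if ["ffuf", "gobuster", "feroxbuster", "whatweb", "nikto"].any (fun t => PySem.Str.isIn t cmd) then "Web Enumeration"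
      else if ["sqlmap", "hydra", "wfuzz"].any (fun t => PySem.Str.isIn t cmd) then "Validation / Exploitation"
      else if ["linpeas", "winpeas", "sudo -l", "id"].any (fun t => PySem.Str.isIn t cmd) then "Privilege Escalation"
      else "Other" := by
  have h : pvKeywords =
      (["nmap", "rustscan", "masscan", "ping"].map (fun kw => (kw, "Recon")) ++
      ((["ffuf", "gobuster", "feroxbuster", "whatweb", "nikto"].map (fun kw => (kw, "Web Enumeration"))) ++
      ((["sqlmap", "hydra", "wfuzz"].map (fun kw => (kw, "Validation / Exploitation"))) ++
      ((["linpeas", "winpeas", "sudo -l", "id"].map (fun kw => (kw, "Privilege Escalation"))) ++ [])))) := rfl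
  rw [h, pvLabelLoop_segment, pvLabelLoop_segment, pvLabelLoop_segment, pvLabelLoop_segment]
  rfl

-- one loop iteration of A = guarded modify at B's label
theorem pvStepA_eq (b : PySem.Dict String (List String)) (row : List (String × String)) :
    pvStepA b row =
      if pvIsCmdRow row then
        PySem.Dict.modify b (pvLabelLoop (pvExtract row) pvKeywords) [] (fun l => l ++ [pvExtract row])
      else b := by
  rw [pvLabelLoop_spec]
  by_cases h : pvGetEvent row = some "command" ∨ pvGetEvent row = some "command_output"
  · have hb : pvIsCmdRow row = true := by
      simp only [pvIsCmdRow, pvGetEvent] at *; simpa using h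
    simp only [pvStepA, pvExtract, h, not_true_eq_false, if_false, hb, if_true]
    split_ifs <;> rfl
  · have hb : pvIsCmdRow row = false := by
      simp only [pvIsCmdRow, pvGetEvent] at *; simpa using h
    simp only [pvStepA, h, not_false_eq_true, if_true, hb, Bool.false_eq_true, if_false]

-- ===== VERDICT (by name: the statement is the Claim_ definition above) =====
theorem categorize_commands_py_spec : Claim_equal_categorize_commands_py := by
  intro rows _
  unfold Spec_categorize_commands_py categorize_commands_py categorize_commands_py_alt
  -- name B's pair list and rewrite it into map-over-filter form
  rw [PySem.List.foldl_append_if]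
  set pairs := ((rows.filter pvIsCmdRow).map
    (fun row => (pvLabelLoop (pvExtract row) pvKeywords, pvExtract row))) with hpairs
  -- A's fold: push the guard into a filter, then fold over the pair list
  have hA : rows.foldl pvStepA PySem.Dict.empty =
      pairs.foldl (fun d p => d.modify p.1 [] (fun l => l ++ [p.2])) PySem.Dict.empty := by
    have h1 : rows.foldl pvStepA PySem.Dict.empty =
        rows.foldl (fun b row =>
          if pvIsCmdRow row then
            PySem.Dict.modify b (pvLabelLoop (pvExtract row) pvKeywords) [] (fun l => l ++ [pvExtract row])
          else b) PySem.Dict.empty := by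
      congr 1; funext b r; exact pvStepA_eq b r
    rw [h1, PySem.List.foldl_if_eq_foldl_filter, hpairs, List.foldl_map]
  rw [hA]
  set D := pairs.foldl (fun d p => d.modify p.1 [] (fun l => l ++ [p.2])) PySem.Dict.empty with hD
  -- keys of A's dict: first-occurrence order of B's labels
  have hkeys : D.keys = PySem.List.dedup (pairs.map (·.1)) := by
    rw [hD, PySem.Dict.keys_foldl_modify_key, PySem.Dict.keys_empty,
      PySem.Set.update_nil_left, PySem.List.dedup_eq_ofList]
  have hnd : D.keys.Nodup := by
    rw [hD]
    exact PySem.Dict.nodup_keys_foldl_modify_key pairs (·.1) [] (fun d p l => l ++ [p.2])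
      PySem.Dict.empty PySem.Dict.nodup_keys_empty
  -- items of A's dict, key by key
  rw [PySem.Dict.items_eq_map_keys D hnd [], hkeys, List.nil_append]
  refine List.map_congr_left (fun k _ => ?_)
  have hget : D.getD k [] = (pairs.filter (fun p => p.1 == k)).map (·.2) := by
    rw [hD, PySem.Dict.getD_foldl_modify_append, PySem.Dict.getD_empty, List.nil_append]
  rw [hget]
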